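-- pv_equiv track=rewrite | github.com/JamesDarby345/Volumetric_Instance_to_Mesh | cube_label_reassignment.py | create_label_group_mapping
-- ===== SOURCE A (Python) =====
-- def create_label_group_mapping(label_groups, mask_files):
--     mapping = {}
--
--     for z_y_x in mask_files:
--         mapping[z_y_x] = []
--         for group_id, group in label_groups.items():
--             for cube_z_y_x, label in group:
--                 if cube_z_y_x == z_y_x:
--                     mapping[z_y_x].append((label, group_id))
--
--         # Sort the list by label value
--         mapping[z_y_x].sort(key=lambda x: x[0])
--
--     return mapping
-- ===== SOURCE B (Python) =====
-- def create_label_group_mapping(label_groups, mask_files):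
--     # One pass over all group entries builds an index from cube coordinate to its
--     # (label, group_id) pairs; each mask file is then a single lookup plus a sort.
--     pairs = [(cube_z_y_x, (label, group_id))
--              for group_id, group in label_groups.items()
--              for cube_z_y_x, label in group]
--     index = {}
--     for cube_z_y_x, entry in pairs:
--         index.setdefault(cube_z_y_x, []).append(entry)
--     return {z_y_x: sorted(index.get(z_y_x, []), key=lambda x: x[0])
--             for z_y_x in mask_files}
-- ===== Notes on version B (the rewrite author's own statement) =====
-- stated objective: faster
-- what changed: Instead of rescanning every group for every mask file (nested loops), B flattens the groups once into an index dict keyed by cube coordinate and answers each mask file by a single lookup plus sort.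
import Mathlib
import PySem

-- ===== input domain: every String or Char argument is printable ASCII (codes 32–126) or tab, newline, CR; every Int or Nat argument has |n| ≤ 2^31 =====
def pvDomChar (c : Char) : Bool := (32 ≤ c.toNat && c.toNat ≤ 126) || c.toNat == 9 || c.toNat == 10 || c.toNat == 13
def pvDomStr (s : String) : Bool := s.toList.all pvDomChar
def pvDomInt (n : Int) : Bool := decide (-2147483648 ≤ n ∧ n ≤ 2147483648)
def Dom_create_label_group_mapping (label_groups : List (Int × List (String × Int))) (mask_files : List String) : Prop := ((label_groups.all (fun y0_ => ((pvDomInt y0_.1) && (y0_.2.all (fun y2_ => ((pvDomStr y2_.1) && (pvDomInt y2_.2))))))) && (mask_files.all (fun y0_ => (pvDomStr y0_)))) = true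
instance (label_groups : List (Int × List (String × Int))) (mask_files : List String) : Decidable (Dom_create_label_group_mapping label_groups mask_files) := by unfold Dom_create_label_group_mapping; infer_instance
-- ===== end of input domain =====

-- B replaces A's per-mask-file rescan of all groups by a one-pass index dict keyed by
-- cube coordinate (faster: O(G) build + one lookup per mask file instead of O(M*G)).


-- ===== PORT A =====
-- mapping[z] = []; nested scan over all groups appending matches into mapping[z]
-- (a Dict.modify at key z = Python's in-place list append); mapping[z].sort(key=x[0])
-- is an in-place sort, ported as Dict.modify with PySem.List.sorted.
def create_label_group_mapping (label_groups : List (Int × List (String × Int))) (mask_files : List String) : List (String × List (Int × Int)) :=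
  (mask_files.foldl (fun (d : PySem.Dict String (List (Int × Int))) z =>
      let d1 := d.insert z []
      let d2 := label_groups.foldl (fun d p =>
          p.2.foldl (fun d q =>
            if q.1 == z then d.modify z [] (fun l => l ++ [(q.2, p.1)]) else d) d) d1
      d2.modify z [] (fun l => PySem.List.sorted l (fun x => x.1) false))
    PySem.Dict.empty).items

-- ===== PORT B =====
-- pairs = flattened (cube, (label, group_id)); index built in one pass
-- (setdefault(k, []).append(e) changes the dict exactly as Dict.modify k [] (· ++ [e]));
-- result dict comprehension: lookup + sort per mask file.
def create_label_group_mapping_alt (label_groups : List (Int × List (String × Int))) (mask_files : List String) : List (String × List (Int × Int)) :=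
  let pairs : List (String × (Int × Int)) :=
    label_groups.flatMap (fun p => p.2.map (fun q => (q.1, (q.2, p.1))))
  let index : PySem.Dict String (List (Int × Int)) :=
    pairs.foldl (fun d pr => d.modify pr.1 [] (fun l => l ++ [pr.2])) PySem.Dict.empty
  (mask_files.foldl (fun (d : PySem.Dict String (List (Int × Int))) z =>
      d.insert z (PySem.List.sorted (index.getD z []) (fun x => x.1) false))
    PySem.Dict.empty).items

-- ===== PRECONDITION & SPEC =====
def Spec_create_label_group_mapping (label_groups : List (Int × List (String × Int))) (mask_files : List String) (out : List (String × List (Int × Int))) : Prop := out = create_label_group_mapping_alt label_groups mask_files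
instance (label_groups : List (Int × List (String × Int))) (mask_files : List String) (out : List (String × List (Int × Int))) : Decidable (Spec_create_label_group_mapping label_groups mask_files out) := by unfold Spec_create_label_group_mapping; infer_instance

-- ===== CLAIM (what is proved, stated in full; the proofs are below) =====
def Claim_equal_create_label_group_mapping : Prop := ∀ (label_groups : List (Int × List (String × Int))) (mask_files : List String), Dom_create_label_group_mapping label_groups mask_files → Spec_create_label_group_mapping label_groups mask_files (create_label_group_mapping label_groups mask_files)

-- ===== LEMMAS AND PROOFS =====

-- the (label, group_id) pairs whose cube coordinate is z, in A's scan order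
def pvCollect (label_groups : List (Int × List (String × Int))) (z : String) : List (Int × Int) :=
  ((label_groups.flatMap (fun p => p.2.map (fun q => (q.1, (q.2, p.1))))).filter
    (fun pr => pr.1 == z)).map (fun pr => pr.2)

-- Dict.modify is an insert of the modified value (definitional; used to rewrite one occurrence)
theorem pvModify_eq_insert (d : PySem.Dict String (List (Int × Int))) (k : String)
    (d0 : List (Int × Int)) (f : List (Int × Int) → List (Int × Int)) :
    d.modify k d0 f = d.insert k (f (d.getD k d0)) := rfl

-- A's conditional-append loop, read at key z
theorem pvFoldl_if_getD (l : List (String × (Int × Int))) (z : String)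
    (d : PySem.Dict String (List (Int × Int))) :
    (l.foldl (fun d pr => if pr.1 == z then d.modify z [] (fun t => t ++ [pr.2]) else d) d).getD z []
      = d.getD z [] ++ (l.filter (fun pr => pr.1 == z)).map (fun pr => pr.2) := by
  induction l generalizing d with
  | nil => simp
  | cons x xs ih =>
    simp only [List.foldl_cons]
    by_cases h : (x.1 == z) = true
    · rw [if_pos h, ih, PySem.Dict.getD_modify_self]
      simp [h]
    · rw [if_neg h, ih]
      simp [h]

-- A's conditional-append loop followed by an overwrite at z collapses to the overwrite
theorem pvFoldl_if_insert (l : List (String × (Int × Int))) (z : String)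
    (d : PySem.Dict String (List (Int × Int))) (v : List (Int × Int)) :
    (l.foldl (fun d pr => if pr.1 == z then d.modify z [] (fun t => t ++ [pr.2]) else d) d).insert z v
      = d.insert z v := by
  induction l generalizing d with
  | nil => rfl
  | cons x xs ih =>
    simp only [List.foldl_cons]
    by_cases h : (x.1 == z) = true
    · rw [if_pos h, ih]
      rw [pvModify_eq_insert, PySem.Dict.insert_insert_self]
    · rw [if_neg h]
      exact ih d

-- A's body for one mask file equals B's body for that mask file
theorem pvStep_eq (label_groups : List (Int × List (String × Int))) (z : String)
    (d : PySem.Dict String (List (Int × Int))) :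
    ((label_groups.foldl (fun d p =>
        p.2.foldl (fun d q =>
          if q.1 == z then d.modify z [] (fun l => l ++ [(q.2, p.1)]) else d) d)
      (d.insert z [])).modify z [] (fun l => PySem.List.sorted l (fun x => x.1) false))
    = d.insert z (PySem.List.sorted (pvCollect label_groups z) (fun x => x.1) false) := by
  have hflat :
      label_groups.foldl (fun d p =>
        p.2.foldl (fun d q =>
          if q.1 == z then d.modify z [] (fun l => l ++ [(q.2, p.1)]) else d) d) (d.insert z [])
      = (label_groups.flatMap (fun p => p.2.map (fun q => (q.1, (q.2, p.1))))).foldl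
          (fun d pr => if pr.1 == z then d.modify z [] (fun t => t ++ [pr.2]) else d)
          (d.insert z []) := by
    rw [List.foldl_flatMap]
    simp only [List.foldl_map]
  rw [hflat, pvModify_eq_insert]
  rw [pvFoldl_if_getD, pvFoldl_if_insert, PySem.Dict.getD_insert_self,
    PySem.Dict.insert_insert_self]
  rfl

-- B's index lookup returns exactly A's collected list
theorem pvIndex_getD (label_groups : List (Int × List (String × Int))) (z : String) :
    ((label_groups.flatMap (fun p => p.2.map (fun q => (q.1, (q.2, p.1))))).foldl
        (fun (d : PySem.Dict String (List (Int × Int))) pr =>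
          d.modify pr.1 [] (fun l => l ++ [pr.2])) PySem.Dict.empty).getD z []
      = pvCollect label_groups z := by
  rw [PySem.Dict.getD_foldl_modify_append]
  simp [pvCollect]

-- ===== VERDICT (by name: the statement is the Claim_ definition above) =====
theorem create_label_group_mapping_spec : Claim_equal_create_label_group_mapping := by
  intro label_groups mask_files _
  unfold Spec_create_label_group_mapping create_label_group_mapping create_label_group_mapping_alt
  refine congrArg PySem.Dict.items ?_
  refine PySem.List.foldl_congr_mem mask_files _ _ PySem.Dict.empty ?_
  intro d z _
  dsimp only
  rw [pvStep_eq, pvIndex_getD]
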